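-- pv_equiv track=rewrite | github.com/Alb3rtohuanuco/examen-t3 | examen.py | resolver_laberinto
-- ===== SOURCE A (Python) =====
-- def resolver_laberinto(laberinto, fila, columna, camino, puntos_actuales, visitado, fila_fin, columna_fin, puntos_minimos_requeridos):
--
--     filas = len(laberinto)
--     columnas = len(laberinto[0])
--
--     if not (0 <= fila < filas and 0 <= columna < columnas):
--         return False
--     if laberinto[fila][columna] == 0:
--         return False
--     if (fila, columna) in visitado:
--         return False
--
--     camino.append((fila, columna))
--     visitado.add((fila, columna))
--
--     valor_celda = laberinto[fila][columna]
--     if valor_celda in [3, 4]: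
--         puntos_actuales += valor_celda
--
--     if fila == fila_fin and columna == columna_fin:
--         if puntos_actuales >= puntos_minimos_requeridos:
--             return True
--         else:
--             camino.pop()
--             visitado.remove((fila, columna))
--             return False
--
--     direcciones = [(-1, 0), (0, 1), (1, 0), (0, -1)]
--
--     for df, dc in direcciones:
--         siguiente_fila, siguiente_columna = fila + df, columna + dc
--         if resolver_laberinto(laberinto, siguiente_fila, siguiente_columna, camino, puntos_actuales, visitado, fila_fin, columna_fin, puntos_minimos_requeridos):
--             return True
--
--     camino.pop()
--     visitado.remove((fila, columna))
--     return False
-- ===== SOURCE B (Python) =====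
-- # Iterative DFS with an explicit stack of (fila, columna, puntos, cursor, visited-set) frames
-- # instead of A's mutate-and-backtrack recursion; on success it applies the same net mutation
-- # to camino/visitado that A leaves behind (on failure A restores them, so B touches nothing).
-- def resolver_laberinto(laberinto, fila, columna, camino, puntos_actuales, visitado, fila_fin, columna_fin, puntos_minimos_requeridos):
--     filas = len(laberinto)
--     columnas = len(laberinto[0])
--
--     def ok(r, c, vis):
--         return (0 <= r < filas and 0 <= c < columnas
--                 and laberinto[r][c] != 0 and (r, c) not in vis)
--
--     def valor(r, c):
--         v = laberinto[r][c]
--         return v if v in (3, 4) else 0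
--
--     def exito(celdas):
--         for p in celdas:
--             camino.append(p)
--             visitado.add(p)
--         return True
--
--     if not ok(fila, columna, visitado):
--         return False
--     pts0 = puntos_actuales + valor(fila, columna)
--     if fila == fila_fin and columna == columna_fin:
--         if pts0 >= puntos_minimos_requeridos:
--             return exito([(fila, columna)])
--         return False
--
--     dirs = [(-1, 0), (0, 1), (1, 0), (0, -1)]
--     stack = [(fila, columna, pts0, 0, visitado | {(fila, columna)})]
--     while stack:
--         r, c, pts, k, vis = stack.pop()
--         if k == 4:
--             continue
--         stack.append((r, c, pts, k + 1, vis))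
--         nr, nc = r + dirs[k][0], c + dirs[k][1]
--         if not ok(nr, nc, vis):
--             continue
--         npts = pts + valor(nr, nc)
--         if nr == fila_fin and nc == columna_fin:
--             if npts >= puntos_minimos_requeridos:
--                 return exito([(fr[0], fr[1]) for fr in stack] + [(nr, nc)])
--             continue
--         stack.append((nr, nc, npts, 0, vis | {(nr, nc)}))
--     return False
-- ===== Notes on version B (the rewrite author's own statement) =====
-- stated objective: alternative
-- what changed: A's recursive backtracking DFS is replaced by an iterative search over an explicit stack of (fila, columna, points, direction-cursor, visited-set) frames that explores the same cells in the same order.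
-- outside the precondition, e.g. on resolver_laberinto([[1], []], 0, 0, [], 0, set(), 0, 0, 0): A returns True, B returns True
import Mathlib
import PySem

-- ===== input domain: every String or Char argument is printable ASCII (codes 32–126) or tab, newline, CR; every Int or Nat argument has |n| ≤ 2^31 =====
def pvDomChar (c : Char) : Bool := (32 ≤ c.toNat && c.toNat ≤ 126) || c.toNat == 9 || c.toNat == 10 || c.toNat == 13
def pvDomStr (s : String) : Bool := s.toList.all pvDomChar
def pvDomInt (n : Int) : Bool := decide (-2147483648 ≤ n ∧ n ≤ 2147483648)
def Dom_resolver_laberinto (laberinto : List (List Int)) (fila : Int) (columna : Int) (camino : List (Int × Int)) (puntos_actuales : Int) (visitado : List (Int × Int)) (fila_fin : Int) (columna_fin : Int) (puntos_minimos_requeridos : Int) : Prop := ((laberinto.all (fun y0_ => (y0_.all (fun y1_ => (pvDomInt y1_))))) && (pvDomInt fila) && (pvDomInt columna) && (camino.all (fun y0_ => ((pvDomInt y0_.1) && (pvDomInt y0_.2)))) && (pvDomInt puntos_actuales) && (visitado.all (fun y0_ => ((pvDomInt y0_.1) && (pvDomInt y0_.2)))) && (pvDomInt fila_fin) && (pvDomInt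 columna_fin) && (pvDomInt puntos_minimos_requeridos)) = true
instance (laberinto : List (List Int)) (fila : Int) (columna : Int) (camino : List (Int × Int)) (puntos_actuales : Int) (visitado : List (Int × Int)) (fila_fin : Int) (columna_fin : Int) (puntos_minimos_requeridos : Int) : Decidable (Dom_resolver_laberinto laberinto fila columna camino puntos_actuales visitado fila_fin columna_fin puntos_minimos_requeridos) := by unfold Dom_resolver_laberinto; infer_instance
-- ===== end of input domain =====

-- B replaces A's recursive mutate-and-backtrack DFS by an iterative search over an explicit stack
-- of frames (objective: alternative). A mutates camino/visitado in place; the equivalence proved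
-- here is about the RETURN value (the Python B reproduces A's net mutations as well).

-- shared helpers: len(laberinto), len(laberinto[0]), laberinto[r][c] (total via getD; exact on Pre_)
def pvFilas (lab : List (List Int)) : Int := (lab.length : Int)
def pvCols (lab : List (List Int)) : Int := ((lab.headD []).length : Int)
def pvCell (lab : List (List Int)) (r c : Int) : Int :=
  (PySem.List.pyGet? ((PySem.List.pyGet? lab r).getD []) c).getD 0

-- termination machinery (used by both ports' decreasing_by): the number of in-grid cells
-- not yet in the visited set strictly shrinks when an unvisited in-grid cell is added
def pvAllCells (lab : List (List Int)) : List (Int × Int) :=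
  (List.range lab.length).flatMap (fun i => (List.range (lab.headD []).length).map (fun j => ((i : Int), (j : Int))))
def pvUnvis (lab : List (List Int)) (vis : List (Int × Int)) : Nat :=
  (pvAllCells lab).countP (fun p => !(decide (p ∈ vis)))

lemma pv_mem_allCells (lab : List (List Int)) (r c : Int)
    (h : 0 ≤ r ∧ r < pvFilas lab ∧ 0 ≤ c ∧ c < pvCols lab) : (r, c) ∈ pvAllCells lab := by
  obtain ⟨h1, h2, h3, h4⟩ := h
  simp only [pvFilas] at h2
  simp only [pvCols] at h4
  rw [List.headD_eq_head?] at h4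
  simp [pvAllCells, Prod.ext_iff]
  exact ⟨⟨r.toNat, by omega, by omega⟩, ⟨c.toNat, by omega, by omega⟩⟩

lemma pv_countP_lt {α : Type} (l : List α) (p q : α → Bool)
    (hpq : ∀ x, p x = true → q x = true) (x : α) (hx : x ∈ l)
    (hq : q x = true) (hp : p x = false) : l.countP p < l.countP q := by
  induction l with
  | nil => cases hx
  | cons a l ih =>
    have hmono : l.countP p ≤ l.countP q := List.countP_mono_left (fun y _ => hpq y)
    rcases List.mem_cons.mp hx with rfl | hm
    · simp [List.countP_cons, hp, hq]
      omega
    · have := ih hm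
      simp only [List.countP_cons]
      by_cases ha : p a = true
      · simp [ha, hpq a ha]; omega
      · simp only [Bool.not_eq_true] at ha
        simp [ha]; split_ifs <;> omega

lemma pvUnvis_lt (lab : List (List Int)) (r c : Int) (vis : List (Int × Int))
    (hb : 0 ≤ r ∧ r < pvFilas lab ∧ 0 ≤ c ∧ c < pvCols lab) (hm : (r, c) ∉ vis) :
    pvUnvis lab (PySem.Set.add vis (r, c)) < pvUnvis lab vis := by
  refine pv_countP_lt _ _ _ ?_ (r, c) (pv_mem_allCells lab r c hb) ?_ ?_
  · intro x hx
    simp only [Bool.not_eq_true', decide_eq_false_iff_not] at hx ⊢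
    intro hxv
    exact hx ((PySem.Set.mem_add _ _ _).mpr (Or.inl hxv))
  · simpa using hm
  · simp [PySem.Set.mem_add]

-- ===== PORT A =====
-- literal transliteration of A: guard chain; camino.append / visitado.add become the list/set
-- passed on; point update; goal test; the for-loop over the literal 4-direction list with
-- early return becomes short-circuit || of the four recursive calls in the same order
def resolver_laberinto (laberinto : List (List Int)) (fila : Int) (columna : Int) (camino : List (Int × Int)) (puntos_actuales : Int) (visitado : List (Int × Int)) (fila_fin : Int) (columna_fin : Int) (puntos_minimos_requeridos : Int) : Bool :=
  if h1 : ¬ (0 ≤ fila ∧ fila < pvFilas laberinto ∧ 0 ≤ columna ∧ columna < pvCols laberinto) then false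
  else if h2 : pvCell laberinto fila columna = 0 then false
  else if h3 : (fila, columna) ∈ visitado then false
  else
    if fila = fila_fin ∧ columna = columna_fin then
      decide (puntos_minimos_requeridos ≤
        (if pvCell laberinto fila columna = 3 ∨ pvCell laberinto fila columna = 4
         then puntos_actuales + pvCell laberinto fila columna else puntos_actuales))
    else
      resolver_laberinto laberinto (fila + -1) (columna + 0) (camino ++ [(fila, columna)])
        (if pvCell laberinto fila columna = 3 ∨ pvCell laberinto fila columna = 4
         then puntos_actuales + pvCell laberinto fila columna else puntos_actuales)
        (PySem.Set.add visitado (fila, columna)) fila_fin columna_fin puntos_minimos_requeridos ||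
      resolver_laberinto laberinto (fila + 0) (columna + 1) (camino ++ [(fila, columna)])
        (if pvCell laberinto fila columna = 3 ∨ pvCell laberinto fila columna = 4
         then puntos_actuales + pvCell laberinto fila columna else puntos_actuales)
        (PySem.Set.add visitado (fila, columna)) fila_fin columna_fin puntos_minimos_requeridos ||
      resolver_laberinto laberinto (fila + 1) (columna + 0) (camino ++ [(fila, columna)])
        (if pvCell laberinto fila columna = 3 ∨ pvCell laberinto fila columna = 4
         then puntos_actuales + pvCell laberinto fila columna else puntos_actuales)
        (PySem.Set.add visitado (fila, columna)) fila_fin columna_fin puntos_minimos_requeridos ||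
      resolver_laberinto laberinto (fila + 0) (columna + -1) (camino ++ [(fila, columna)])
        (if pvCell laberinto fila columna = 3 ∨ pvCell laberinto fila columna = 4
         then puntos_actuales + pvCell laberinto fila columna else puntos_actuales)
        (PySem.Set.add visitado (fila, columna)) fila_fin columna_fin puntos_minimos_requeridos
termination_by pvUnvis laberinto visitado
decreasing_by all_goals exact pvUnvis_lt laberinto fila columna visitado (not_not.mp h1) h3

-- ===== PORT B =====
-- B-side helpers (Python B's local ok/valor and the frame stack)
def pvDirs : List (Int × Int) := [(-1, 0), (0, 1), (1, 0), (0, -1)]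
def pvNext (r c : Int) (k : Nat) : Int × Int := (r + (pvDirs.getD k (0, 0)).1, c + (pvDirs.getD k (0, 0)).2)
def okB (lab : List (List Int)) (r c : Int) (vis : List (Int × Int)) : Bool :=
  decide ((0 ≤ r ∧ r < pvFilas lab ∧ 0 ≤ c ∧ c < pvCols lab) ∧ pvCell lab r c ≠ 0 ∧ (r, c) ∉ vis)
def pvPts (lab : List (List Int)) (pts : Int) (r c : Int) : Int :=
  if pvCell lab r c = 3 ∨ pvCell lab r c = 4 then pts + pvCell lab r c else pts

-- a frame: (fila, columna, accumulated points, direction cursor, visited set of this frame's path)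
abbrev pvFrame : Type := Int × Int × Int × Nat × List (Int × Int)

-- termination measure for the stack machine
def pvS : Nat → Nat
  | 0 => 1
  | u + 1 => 2 + 4 * pvS u
def pvC (u k : Nat) : Nat := (4 - k) * pvS u + 1
def pvM (lab : List (List Int)) (stack : List pvFrame) : Nat :=
  (stack.map (fun fr => pvC (pvUnvis lab fr.2.2.2.2) fr.2.2.2.1)).sum

lemma pvS_pos (u : Nat) : 1 ≤ pvS u := by cases u <;> simp [pvS]; omega

lemma pvS_le {a b : Nat} (h : a ≤ b) : pvS a ≤ pvS b := by
  induction h with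
  | refl => exact Nat.le_refl _
  | step h ih => exact le_trans ih (by simp [pvS]; omega)

lemma pvM_pop (lab : List (List Int)) (r c pts : Int) (k : Nat) (vis : List (Int × Int))
    (rest : List pvFrame) : pvM lab rest < pvM lab ((r, c, pts, k, vis) :: rest) := by
  simp only [pvM, List.map_cons, List.sum_cons, pvC]
  omega

lemma pvM_adv (lab : List (List Int)) (r c pts : Int) (k : Nat) (vis : List (Int × Int))
    (rest : List pvFrame) (hk : ¬ 4 ≤ k) :
    pvM lab ((r, c, pts, k + 1, vis) :: rest) < pvM lab ((r, c, pts, k, vis) :: rest) := by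
  simp only [pvM, List.map_cons, List.sum_cons, pvC]
  have hs := pvS_pos (pvUnvis lab vis)
  have he : 4 - k = (3 - k) + 1 := by omega
  have he2 : 4 - (k + 1) = 3 - k := by omega
  rw [he, he2, Nat.add_mul, one_mul]
  omega

lemma pvM_push (lab : List (List Int)) (r c pts : Int) (k : Nat) (vis : List (Int × Int))
    (rest : List pvFrame) (nr nc npts : Int) (hk : ¬ 4 ≤ k)
    (hb : 0 ≤ nr ∧ nr < pvFilas lab ∧ 0 ≤ nc ∧ nc < pvCols lab) (hm : (nr, nc) ∉ vis) :
    pvM lab ((nr, nc, npts, 0, PySem.Set.add vis (nr, nc)) :: (r, c, pts, k + 1, vis) :: rest)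
      < pvM lab ((r, c, pts, k, vis) :: rest) := by
  have hlt := pvUnvis_lt lab nr nc vis hb hm
  simp only [pvM, List.map_cons, List.sum_cons, pvC]
  set u := pvUnvis lab vis with hu
  set u' := pvUnvis lab (PySem.Set.add vis (nr, nc)) with hu'
  have ht : u = (u - 1) + 1 := by omega
  have hle : pvS u' ≤ pvS (u - 1) := pvS_le (by omega)
  have hm2 : pvS u = 2 + 4 * pvS (u - 1) := by rw [ht]; rfl
  have he : 4 - k = (3 - k) + 1 := by omega
  have he2 : 4 - (k + 1) = 3 - k := by omega
  rw [he, he2, Nat.add_mul, one_mul]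
  omega

-- the explicit-stack loop of B: pop the top frame; cursor exhausted → discard; otherwise
-- advance the cursor, probe the next cell in direction k, and on success either answer the
-- goal test or push a child frame
def pvB_run (lab : List (List Int)) (ff fc pm : Int) : List pvFrame → Bool
  | [] => false
  | (r, c, pts, k, vis) :: rest =>
    if hk : 4 ≤ k then pvB_run lab ff fc pm rest
    else
      if hok : okB lab (pvNext r c k).1 (pvNext r c k).2 vis = true then
        if (pvNext r c k).1 = ff ∧ (pvNext r c k).2 = fc then
          if pm ≤ pvPts lab pts (pvNext r c k).1 (pvNext r c k).2 then true
          else pvB_run lab ff fc pm ((r, c, pts, k + 1, vis) :: rest)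
        else
          pvB_run lab ff fc pm
            (((pvNext r c k).1, (pvNext r c k).2, pvPts lab pts (pvNext r c k).1 (pvNext r c k).2, 0,
               PySem.Set.add vis ((pvNext r c k).1, (pvNext r c k).2)) :: (r, c, pts, k + 1, vis) :: rest)
      else pvB_run lab ff fc pm ((r, c, pts, k + 1, vis) :: rest)
termination_by stack => pvM lab stack
decreasing_by
  · exact pvM_pop lab r c pts k vis rest
  · exact pvM_adv lab r c pts k vis rest hk
  · have h := (decide_eq_true_iff).mp hok
    exact pvM_push lab r c pts k vis rest _ _ _ hk h.1 h.2.2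
  · exact pvM_adv lab r c pts k vis rest hk

-- transliteration of B's entry: start guards, start point value, start goal test, then the loop
def resolver_laberinto_alt (laberinto : List (List Int)) (fila : Int) (columna : Int) (camino : List (Int × Int)) (puntos_actuales : Int) (visitado : List (Int × Int)) (fila_fin : Int) (columna_fin : Int) (puntos_minimos_requeridos : Int) : Bool :=
  if okB laberinto fila columna visitado then
    if fila = fila_fin ∧ columna = columna_fin then
      decide (puntos_minimos_requeridos ≤ pvPts laberinto puntos_actuales fila columna)
    else
      pvB_run laberinto fila_fin columna_fin puntos_minimos_requeridos
        [(fila, columna, pvPts laberinto puntos_actuales fila columna, 0, PySem.Set.add visitado (fila, columna))]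
  else false

-- ===== PRECONDITION & SPEC =====
-- Pre_ excludes the inputs on which Python A raises IndexError: an empty laberinto, and a ragged
-- laberinto (some row shorter than row 0) unless A's start-cell guards (out of bounds, wall,
-- already visited) answer immediately without searching; this also excludes some ragged inputs on
-- which A happens to return because the search never probes a short row (cite in claim.json).
def Pre_resolver_laberinto (laberinto : List (List Int)) (fila : Int) (columna : Int) (camino : List (Int × Int)) (puntos_actuales : Int) (visitado : List (Int × Int)) (fila_fin : Int) (columna_fin : Int) (puntos_minimos_requeridos : Int) : Prop :=
  laberinto ≠ [] ∧
  ( (∀ row ∈ laberinto, (laberinto.headD []).length ≤ row.length)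
    ∨ ¬ (0 ≤ fila ∧ fila < pvFilas laberinto ∧ 0 ≤ columna ∧ columna < pvCols laberinto)
    ∨ (columna < ((((PySem.List.pyGet? laberinto fila).getD []).length : Int))
        ∧ (pvCell laberinto fila columna = 0 ∨ (fila, columna) ∈ visitado)) )
instance (laberinto : List (List Int)) (fila : Int) (columna : Int) (camino : List (Int × Int)) (puntos_actuales : Int) (visitado : List (Int × Int)) (fila_fin : Int) (columna_fin : Int) (puntos_minimos_requeridos : Int) : Decidable (Pre_resolver_laberinto laberinto fila columna camino puntos_actuales visitado fila_fin columna_fin puntos_minimos_requeridos) := by unfold Pre_resolver_laberinto; infer_instance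

def pvWitness_resolver_laberinto : List (List Int) × Int × Int × (List (Int × Int)) × Int × (List (Int × Int)) × Int × Int × Int :=
  ([[1, 3], [0, 1]], 0, 0, [], 0, [], 1, 1, 3)

def Spec_resolver_laberinto (laberinto : List (List Int)) (fila : Int) (columna : Int) (camino : List (Int × Int)) (puntos_actuales : Int) (visitado : List (Int × Int)) (fila_fin : Int) (columna_fin : Int) (puntos_minimos_requeridos : Int) (out : Bool) : Prop := out = resolver_laberinto_alt laberinto fila columna camino puntos_actuales visitado fila_fin columna_fin puntos_minimos_requeridos
instance (laberinto : List (List Int)) (fila : Int) (columna : Int) (camino : List (Int × Int)) (puntos_actuales : Int) (visitado : List (Int × Int)) (fila_fin : Int) (columna_fin : Int) (puntos_minimos_requeridos : Int) (out : Bool) : Decidable (Spec_resolver_laberinto laberinto fila columna camino puntos_actuales visitado fila_fin columna_fin puntos_minimos_requeridos out) := by unfold Spec_resolver_laberinto; infer_instance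

-- ===== CLAIM (what is proved, stated in full; the proofs are below) =====
def Claim_equal_resolver_laberinto : Prop := ∀ (laberinto : List (List Int)) (fila : Int) (columna : Int) (camino : List (Int × Int)) (puntos_actuales : Int) (visitado : List (Int × Int)) (fila_fin : Int) (columna_fin : Int) (puntos_minimos_requeridos : Int), Dom_resolver_laberinto laberinto fila columna camino puntos_actuales visitado fila_fin columna_fin puntos_minimos_requeridos → Pre_resolver_laberinto laberinto fila columna camino puntos_actuales visitado fila_fin columna_fin puntos_minimos_requeridos → Spec_resolver_laberinto laberinto fila columna camino puntos_actuales visitado fila_fin columna_fin puntos_minimos_requeridos (resolver_laberinto laberinto fila columna camino puntos_actuales visitado fila_fin columna_fin puntos_minimos_requeridos)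

-- ===== LEMMAS AND PROOFS =====

-- A's result does not depend on camino (camino only accumulates the path)
lemma pvA_camino : ∀ (n : Nat) (lab : List (List Int)) (f c : Int) (cam1 cam2 : List (Int × Int))
    (pts : Int) (vis : List (Int × Int)) (ff fc pm : Int), pvUnvis lab vis < n →
    resolver_laberinto lab f c cam1 pts vis ff fc pm = resolver_laberinto lab f c cam2 pts vis ff fc pm := by
  intro n
  induction n with
  | zero => intro _ _ _ _ _ _ _ _ _ _ h; exact absurd h (Nat.not_lt_zero _)
  | succ n ih =>
    intro lab f c cam1 cam2 pts vis ff fc pm h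
    conv_lhs => rw [resolver_laberinto.eq_def]
    conv_rhs => rw [resolver_laberinto.eq_def]
    split_ifs with h1 h2 h3 h4 h5
    all_goals try rfl
    all_goals
      have hlt : pvUnvis lab (PySem.Set.add vis (f, c)) < n :=
        Nat.lt_of_lt_of_le (pvUnvis_lt lab f c vis h1 h3) (Nat.lt_succ_iff.mp h)
    all_goals
      rw [ih lab _ _ (cam1 ++ [(f, c)]) (cam2 ++ [(f, c)]) _ _ _ _ _ hlt,
          ih lab _ _ (cam1 ++ [(f, c)]) (cam2 ++ [(f, c)]) _ _ _ _ _ hlt,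
          ih lab _ _ (cam1 ++ [(f, c)]) (cam2 ++ [(f, c)]) _ _ _ _ _ hlt,
          ih lab _ _ (cam1 ++ [(f, c)]) (cam2 ++ [(f, c)]) _ _ _ _ _ hlt]

-- characterisation of A by the B-side guard okB
lemma pvA_not_ok (lab : List (List Int)) (r c : Int) (cam : List (Int × Int)) (pts : Int)
    (vis : List (Int × Int)) (ff fc pm : Int) (h : okB lab r c vis = false) :
    resolver_laberinto lab r c cam pts vis ff fc pm = false := by
  simp only [okB, decide_eq_false_iff_not, not_and_or, not_not] at h
  rcases h with (h | h | h | h) | h | h <;> rw [resolver_laberinto.eq_def] <;> simp [h]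

lemma pvA_ok_goal (lab : List (List Int)) (r c : Int) (cam : List (Int × Int)) (pts : Int)
    (vis : List (Int × Int)) (ff fc pm : Int) (h : okB lab r c vis = true)
    (hg : r = ff ∧ c = fc) :
    resolver_laberinto lab r c cam pts vis ff fc pm = decide (pm ≤ pvPts lab pts r c) := by
  obtain ⟨hg1, hg2⟩ := hg
  subst hg1
  subst hg2
  simp only [okB, decide_eq_true_iff] at h
  obtain ⟨hb, hcell, hmem⟩ := h
  rw [resolver_laberinto.eq_def]
  rw [dif_neg (not_not.mpr hb), dif_neg hcell, dif_neg hmem, if_pos ⟨rfl, rfl⟩]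
  simp [pvPts]

lemma pvA_ok_step (lab : List (List Int)) (r c : Int) (cam : List (Int × Int)) (pts : Int)
    (vis : List (Int × Int)) (ff fc pm : Int) (h : okB lab r c vis = true)
    (hg : ¬ (r = ff ∧ c = fc)) :
    resolver_laberinto lab r c cam pts vis ff fc pm =
      pvDirs.any (fun d => resolver_laberinto lab (r + d.1) (c + d.2) [] (pvPts lab pts r c)
        (PySem.Set.add vis (r, c)) ff fc pm) := by
  simp only [okB, decide_eq_true_iff] at h
  obtain ⟨hb, hcell, hmem⟩ := h
  rw [resolver_laberinto.eq_def]
  rw [dif_neg (not_not.mpr hb), dif_neg hcell, dif_neg hmem, if_neg hg]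
  have hcam : ∀ (f' c' p : Int),
      resolver_laberinto lab f' c' (cam ++ [(r, c)]) p (PySem.Set.add vis (r, c)) ff fc pm
      = resolver_laberinto lab f' c' [] p (PySem.Set.add vis (r, c)) ff fc pm := fun f' c' p =>
    pvA_camino (pvUnvis lab (PySem.Set.add vis (r, c)) + 1) lab f' c' _ _ p _ ff fc pm (Nat.lt_succ_self _)
  rw [hcam, hcam, hcam, hcam]
  simp [pvDirs, pvPts, Bool.or_assoc]
-- the value of one stack frame: what the remaining directions of that frame can still find
def pvFrameVal (lab : List (List Int)) (ff fc pm : Int) (fr : pvFrame) : Bool :=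
  (pvDirs.drop fr.2.2.2.1).any (fun d =>
    resolver_laberinto lab (fr.1 + d.1) (fr.2.1 + d.2) [] fr.2.2.1 fr.2.2.2.2 ff fc pm)

lemma pv_drop_ge (k : Nat) (hk : 4 ≤ k) : pvDirs.drop k = [] :=
  List.drop_eq_nil_of_le (by simp [pvDirs]; omega)

lemma pv_drop_lt (k : Nat) (hk : ¬ 4 ≤ k) :
    pvDirs.drop k = pvDirs.getD k (0, 0) :: pvDirs.drop (k + 1) := by
  interval_cases k <;> rfl

-- the stack machine computes the disjunction of its frames' values
lemma pv_run_eq (lab : List (List Int)) (ff fc pm : Int) : ∀ (n : Nat) (stack : List pvFrame),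
    pvM lab stack < n → pvB_run lab ff fc pm stack = stack.any (pvFrameVal lab ff fc pm) := by
  intro n
  induction n with
  | zero => intro _ h; exact absurd h (Nat.not_lt_zero _)
  | succ n ih =>
    intro stack h
    match stack with
    | [] => rw [pvB_run.eq_def]; rfl
    | (r, c, pts, k, vis) :: rest =>
      rw [pvB_run.eq_def]
      simp only [List.any_cons]
      by_cases hk : 4 ≤ k
      · rw [dif_pos hk, ih rest (Nat.lt_of_lt_of_le (pvM_pop lab r c pts k vis rest) (Nat.lt_succ_iff.mp h))]
        simp [pvFrameVal, pv_drop_ge k hk]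
      · rw [dif_neg hk]
        have hadv : pvM lab ((r, c, pts, k + 1, vis) :: rest) < n :=
          Nat.lt_of_lt_of_le (pvM_adv lab r c pts k vis rest hk) (Nat.lt_succ_iff.mp h)
        have hfr : pvFrameVal lab ff fc pm (r, c, pts, k, vis) =
            (resolver_laberinto lab (pvNext r c k).1 (pvNext r c k).2 [] pts vis ff fc pm ||
              pvFrameVal lab ff fc pm (r, c, pts, k + 1, vis)) := by
          simp [pvFrameVal, pv_drop_lt k hk, pvNext]
        by_cases hok : okB lab (pvNext r c k).1 (pvNext r c k).2 vis = true
        · rw [dif_pos hok]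
          by_cases hg : (pvNext r c k).1 = ff ∧ (pvNext r c k).2 = fc
          · rw [if_pos hg]
            rw [hfr, pvA_ok_goal lab _ _ [] pts vis ff fc pm hok hg]
            by_cases hpm : pm ≤ pvPts lab pts (pvNext r c k).1 (pvNext r c k).2
            · simp [hpm]
            · rw [if_neg hpm, ih _ hadv]
              simp [hpm, List.any_cons]
          · rw [if_neg hg]
            have hpush : pvM lab (((pvNext r c k).1, (pvNext r c k).2,
                pvPts lab pts (pvNext r c k).1 (pvNext r c k).2, 0,
                PySem.Set.add vis ((pvNext r c k).1, (pvNext r c k).2)) :: (r, c, pts, k + 1, vis) :: rest) < n := by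
              have hh := (decide_eq_true_iff).mp hok
              exact Nat.lt_of_lt_of_le
                (pvM_push lab r c pts k vis rest _ _ _ hk hh.1 hh.2.2) (Nat.lt_succ_iff.mp h)
            rw [ih _ hpush]
            simp only [List.any_cons]
            rw [hfr, pvA_ok_step lab _ _ [] pts vis ff fc pm hok hg]
            have : pvFrameVal lab ff fc pm ((pvNext r c k).1, (pvNext r c k).2,
                pvPts lab pts (pvNext r c k).1 (pvNext r c k).2, 0,
                PySem.Set.add vis ((pvNext r c k).1, (pvNext r c k).2)) =
              pvDirs.any (fun d => resolver_laberinto lab ((pvNext r c k).1 + d.1)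
                ((pvNext r c k).2 + d.2) [] (pvPts lab pts (pvNext r c k).1 (pvNext r c k).2)
                (PySem.Set.add vis ((pvNext r c k).1, (pvNext r c k).2)) ff fc pm) := by
              simp [pvFrameVal]
            rw [this, Bool.or_assoc]
        · rw [dif_neg hok, ih _ hadv]
          simp only [List.any_cons]
          rw [hfr, pvA_not_ok lab _ _ [] pts vis ff fc pm (by simpa using hok)]
          simp

-- ===== VERDICT (by name: the statement is the Claim_ definition above) =====
theorem resolver_laberinto_spec : Claim_equal_resolver_laberinto := by
  intro lab fila columna camino pts vis ff fc pm _ _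
  unfold Spec_resolver_laberinto
  by_cases hok : okB lab fila columna vis = true
  · by_cases hg : fila = ff ∧ columna = fc
    · rw [pvA_ok_goal lab _ _ camino pts vis ff fc pm hok hg]
      obtain ⟨rfl, rfl⟩ := hg
      rw [resolver_laberinto_alt, if_pos hok, if_pos ⟨rfl, rfl⟩]
    · rw [pvA_ok_step lab _ _ camino pts vis ff fc pm hok hg]
      have := pv_run_eq lab ff fc pm
        (pvM lab [(fila, columna, pvPts lab pts fila columna, 0, PySem.Set.add vis (fila, columna))] + 1)
        [(fila, columna, pvPts lab pts fila columna, 0, PySem.Set.add vis (fila, columna))]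
        (Nat.lt_succ_self _)
      simp only [resolver_laberinto_alt, if_pos hok, if_neg hg, this, List.any_cons, List.any_nil,
        Bool.or_false, pvFrameVal, List.drop_zero]
  · rw [pvA_not_ok lab _ _ camino pts vis ff fc pm (by simpa using hok)]
    simp [resolver_laberinto_alt, hok]
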